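-- pv_equiv track=rewrite | github.com/bmarcote/evn_support | comment_tasav_file.py | parse_sources_list
-- ===== SOURCE A (Python) =====
-- def parse_sources_list(sources, max_item_first_raw=3):
--     """Converts the list of elements to a comma-separated string list.
--     The max number of items for the first raw can also be defined.
--     """
--     s = ''
--     if len(sources) > max_item_first_raw:
--         s += ', '.join(sources[:max_item_first_raw])
--         sources = sources[max_item_first_raw:]
--         s += ',\n        '
--         while len(sources) > 6:
--             s += ', '.join(sources[:6])
--             s += ',\n        '
--             sources = sources[6:]
--
--     s += ', '.join(sources)
--     return s
-- ===== SOURCE B (Python) =====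
-- def parse_sources_list(sources, max_item_first_raw=3):
--     """Converts the list of elements to a comma-separated string list.
--     The max number of items for the first raw can also be defined.
--     """
--     if len(sources) <= max_item_first_raw:
--         return ', '.join(sources)
--     rest = sources[max_item_first_raw:]
--     chunks = [sources[:max_item_first_raw]] + [rest[i:i+6] for i in range(0, len(rest), 6)]
--     return ',\n        '.join(', '.join(chunk) for chunk in chunks)
-- ===== Notes on version B (the rewrite author's own statement) =====
-- stated objective: faster
-- what changed: Replaces A's quadratic incremental string accumulation and destructive list re-slicing loop with building the list of line-chunks (first slice, then 6-sized slices of the remainder via range) and emitting the result with one terminal join.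
-- intended difference: On an empty source list with a negative max_item_first_raw, A returns the bare separator ',\n ' (a leftover of its unconditional separator append), while B returns the empty string, the intended rendering of no sources. — e.g. on parse_sources_list([], -1): A returns ",\n ", B returns ""
import Mathlib
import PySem

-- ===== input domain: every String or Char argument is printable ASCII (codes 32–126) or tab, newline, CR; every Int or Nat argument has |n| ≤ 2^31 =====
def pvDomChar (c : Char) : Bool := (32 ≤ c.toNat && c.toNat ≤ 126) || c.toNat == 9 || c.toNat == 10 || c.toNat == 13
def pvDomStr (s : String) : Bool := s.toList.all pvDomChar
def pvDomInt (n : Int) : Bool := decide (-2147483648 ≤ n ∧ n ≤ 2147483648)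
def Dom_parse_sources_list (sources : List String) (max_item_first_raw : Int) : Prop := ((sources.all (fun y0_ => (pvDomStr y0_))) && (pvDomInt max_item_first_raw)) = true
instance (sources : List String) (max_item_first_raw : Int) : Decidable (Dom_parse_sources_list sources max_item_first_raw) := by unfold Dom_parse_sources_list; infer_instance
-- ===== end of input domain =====

-- B builds the list of line-chunks (first slice, then 6-sized slices of the remainder) and emits
-- the result with one terminal join, instead of A's incremental string accumulation; return value only.

-- ===== PORT A =====
-- A's while loop plus the shared final `s += ', '.join(sources)`
def pvA_loop (s : String) (sources : List String) : String :=
  if _h : 6 < sources.length then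
    pvA_loop (s ++ PySem.Str.join ", " (PySem.List.slice sources none (some 6)) ++ ",\n        ")
             (PySem.List.slice sources (some 6) none)
  else
    s ++ PySem.Str.join ", " sources
termination_by sources.length
decreasing_by
  simp [PySem.List.slice_some_none, PySem.List.clampIdx]
  omega

def parse_sources_list (sources : List String) (max_item_first_raw : Int) : String :=
  if (sources.length : Int) > max_item_first_raw then
    let s := "" ++ PySem.Str.join ", " (PySem.List.slice sources none (some max_item_first_raw))
    let sources' := PySem.List.slice sources (some max_item_first_raw) none
    pvA_loop (s ++ ",\n        ") sources'
  else
    "" ++ PySem.Str.join ", " sources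

-- ===== PORT B =====
def parse_sources_list_alt (sources : List String) (max_item_first_raw : Int) : String :=
  if (sources.length : Int) ≤ max_item_first_raw then
    PySem.Str.join ", " sources
  else
    let rest := PySem.List.slice sources (some max_item_first_raw) none
    let chunks := PySem.List.slice sources none (some max_item_first_raw) ::
      (PySem.List.pyRange 0 (rest.length : Int) 6).map
        (fun i => PySem.List.slice rest (some i) (some (i + 6)))
    PySem.Str.join ",\n        " (chunks.map (fun chunk => PySem.Str.join ", " chunk))

-- ===== PRECONDITION & SPEC =====
-- On an empty source list with negative max_item_first_raw, A returns the bare separator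
-- ",\n        " (leftover of its unconditional separator append), while B returns "",
-- the intended rendering of an empty source list.
def D_parse_sources_list (sources : List String) (max_item_first_raw : Int) : Prop :=
  sources = [] ∧ max_item_first_raw < 0
instance (sources : List String) (max_item_first_raw : Int) : Decidable (D_parse_sources_list sources max_item_first_raw) := by unfold D_parse_sources_list; infer_instance

def Spec_parse_sources_list (sources : List String) (max_item_first_raw : Int) (out : String) : Prop := ¬ D_parse_sources_list sources max_item_first_raw → out = parse_sources_list_alt sources max_item_first_raw
instance (sources : List String) (max_item_first_raw : Int) (out : String) : Decidable (Spec_parse_sources_list sources max_item_first_raw out) := by unfold Spec_parse_sources_list; infer_instance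

def pvDiffWitness_parse_sources_list : List String × Int := ([], -1)
def pvDiffWitnessOut_parse_sources_list : String × String := (",\n        ", "")

-- ===== CLAIM (what is proved, stated in full; the proofs are below) =====
def Claim_unchanged_parse_sources_list : Prop := ∀ (sources : List String) (max_item_first_raw : Int), Dom_parse_sources_list sources max_item_first_raw → Spec_parse_sources_list sources max_item_first_raw (parse_sources_list sources max_item_first_raw)
def Claim_changed_parse_sources_list : Prop := Dom_parse_sources_list (pvDiffWitness_parse_sources_list.1) (pvDiffWitness_parse_sources_list.2) ∧ D_parse_sources_list (pvDiffWitness_parse_sources_list.1) (pvDiffWitness_parse_sources_list.2) ∧ parse_sources_list (pvDiffWitness_parse_sources_list.1) (pvDiffWitness_parse_sources_list.2) = pvDiffWitnessOut_parse_sources_list.1 ∧ parse_sources_list_alt (pvDiffWitness_parse_sources_list.1) (pvDiffWitness_parse_sources_list.2) = pvDiffWitnessOut_parse_sources_list.2 ∧ pvDiffWitnessOut_parse_sources_list.1 ≠ pvDiffWitnessOut_parse_sources_list.2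
def Claim_exact_parse_sources_list : Prop := ∀ (sources : List String) (max_item_first_raw : Int), Dom_parse_sources_list sources max_item_first_raw → D_parse_sources_list sources max_item_first_raw → parse_sources_list sources max_item_first_raw ≠ parse_sources_list_alt sources max_item_first_raw

-- ===== LEMMAS AND PROOFS =====

lemma slice_take6 (l : List String) : PySem.List.slice l none (some 6) = l.take 6 := by
  have := PySem.List.slice_to l (b := 6) (by norm_num)
  rw [this]
  rfl

lemma slice_shift6 (l : List String) (y : Int) (hy : 0 ≤ y) :
    PySem.List.slice l (some (y + 6)) (some (y + 6 + 6))
      = PySem.List.slice (l.drop 6) (some y) (some (y + 6)) := by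
  have h1 := PySem.List.slice_toNat l (a := y + 6) (b := y + 6 + 6) (by omega) (by omega)
  have h2 := PySem.List.slice_toNat (l.drop 6) (a := y) (b := y + 6) (by omega) (by omega)
  rw [h1, h2, List.drop_drop]
  have e1 : (y + 6 + 6).toNat - (y + 6).toNat = (y + 6).toNat - y.toNat := by omega
  have e2 : (y + 6).toNat = y.toNat + 6 := by omega
  rw [e1, e2, Nat.add_comm 6 y.toNat]

lemma str_join_cons_cons (sep p q : String) (rest : List String) :
    PySem.Str.join sep (p :: q :: rest) = p ++ sep ++ PySem.Str.join sep (q :: rest) := by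
  apply String.toList_inj.mp
  simp [PySem.Str.toList_join, PySem.Chars.join_cons_cons]

lemma str_join_singleton (sep p : String) : PySem.Str.join sep [p] = p := by
  apply String.toList_inj.mp
  simp [PySem.Str.toList_join, PySem.Chars.join_singleton]

-- B's chunk list of a nonempty list of at most 6 elements is just [l]
lemma chunks_base (l : List String) (h0 : l ≠ []) (h6 : l.length ≤ 6) :
    (PySem.List.pyRange 0 (l.length : Int) 6).map
      (fun i => PySem.List.slice l (some i) (some (i + 6))) = [l] := by
  have hn : 0 < l.length := List.length_pos_iff.mpr h0
  rw [PySem.List.pyRange_of_pos _ _ (by norm_num)]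
  have hc : (if (0:Int) < (l.length : Int) then ((((l.length : Int)) - 0 + 6 - 1) / 6).toNat else 0) = 1 := by
    rw [if_pos (by exact_mod_cast hn)]
    omega
  rw [hc]
  simp only [List.range_one, List.map_cons, List.map_nil, Nat.cast_zero]
  norm_num
  rw [slice_take6]
  simp [List.take_of_length_le h6]

-- B's chunk list peels off the first 6 elements
lemma chunks_step (l : List String) (h : 6 < l.length) :
    (PySem.List.pyRange 0 (l.length : Int) 6).map
      (fun i => PySem.List.slice l (some i) (some (i + 6)))
    = l.take 6 :: (PySem.List.pyRange 0 ((l.drop 6).length : Int) 6).map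
      (fun i => PySem.List.slice (l.drop 6) (some i) (some (i + 6))) := by
  rw [PySem.List.pyRange_of_pos _ _ (by norm_num), PySem.List.pyRange_of_pos _ _ (by norm_num)]
  rw [List.map_map, List.map_map]
  have hc : (if (0:Int) < (l.length : Int) then ((((l.length : Int)) - 0 + 6 - 1) / 6).toNat else 0)
      = (if (0:Int) < ((l.drop 6).length : Int) then (((((l.drop 6).length : Int)) - 0 + 6 - 1) / 6).toNat else 0) + 1 := by
    have h6 : (l.drop 6).length = l.length - 6 := by simp
    rw [if_pos (by exact_mod_cast Nat.lt_of_le_of_lt (Nat.zero_le _) h), if_pos (by simp; omega)]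
    rw [h6]
    omega
  rw [hc, List.range_succ_eq_map]
  simp only [List.map_cons, List.map_map, Function.comp, Nat.cast_zero]
  congr 1
  · norm_num
    rw [slice_take6]
  · apply List.map_congr_left
    intro k _
    simp only [Function.comp_apply, Nat.succ_eq_add_one]
    rw [show (0 + 6 * ((k + 1 : Nat) : Int)) = (0 + 6 * (k : Int)) + 6 by push_cast; ring]
    exact slice_shift6 l (0 + 6 * (k : Int)) (by positivity)

-- the chunk list of a nonempty list is nonempty
lemma chunks_ne_nil (l : List String) (h0 : l ≠ []) :
    (PySem.List.pyRange 0 (l.length : Int) 6).map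
      (fun i => PySem.List.slice l (some i) (some (i + 6))) ≠ [] := by
  by_cases h : 6 < l.length
  · rw [chunks_step l h]; simp
  · rw [chunks_base l h0 (by omega)]; simp

-- A's loop produces exactly the join of B's chunk list
lemma pvA_loop_eq (s : String) (l : List String) (h0 : l ≠ []) :
    pvA_loop s l = s ++ PySem.Str.join ",\n        "
      (((PySem.List.pyRange 0 (l.length : Int) 6).map
          (fun i => PySem.List.slice l (some i) (some (i + 6)))).map
        (fun chunk => PySem.Str.join ", " chunk)) := by
  induction s, l using pvA_loop.induct with
  | case1 s l h ih =>
    rw [pvA_loop.eq_def, dif_pos h]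
    have hdrop : PySem.List.slice l (some 6) none = l.drop 6 := by
      rw [PySem.List.slice_some_none]
      congr 1
      simp [PySem.List.clampIdx]
      omega
    have hdne : l.drop 6 ≠ [] := by
      intro hcon
      have := congrArg List.length hcon
      simp at this
      omega
    rw [hdrop] at ih ⊢
    rw [ih hdne]
    rw [chunks_step l h]
    obtain ⟨c, cs, hcs⟩ := List.exists_cons_of_ne_nil (chunks_ne_nil (l.drop 6) hdne)
    rw [hcs]
    simp only [List.map_cons]
    rw [str_join_cons_cons]
    rw [slice_take6]
    apply String.toList_inj.mp
    simp
  | case2 s l h =>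
    rw [pvA_loop.eq_def, dif_neg h]
    rw [chunks_base l h0 (by omega)]
    simp only [List.map_cons, List.map_nil]
    rw [str_join_singleton]

lemma rest_ne_nil (sources : List String) (m : Int) (hgt : m < (sources.length : Int))
    (hnd : ¬ (sources = [] ∧ m < 0)) :
    PySem.List.slice sources (some m) none ≠ [] := by
  rw [PySem.List.slice_some_none]
  intro hcon
  have hlen := congrArg List.length hcon
  simp [PySem.List.clampIdx] at hlen
  have hne : sources ≠ [] := by
    intro h
    subst h
    simp at hgt
    exact hnd ⟨rfl, by omega⟩
  have hpos : 0 < sources.length := List.length_pos_iff.mpr hne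
  split_ifs at hlen <;> omega

lemma a_empty_neg (m : Int) (h2 : m < 0) : parse_sources_list [] m = ",\n        " := by
  unfold parse_sources_list
  rw [if_pos (by simp; omega)]
  rw [pvA_loop.eq_def, dif_neg (by simp [PySem.List.slice_some_none])]
  apply String.toList_inj.mp
  simp [PySem.Str.toList_join, PySem.Chars.join, PySem.List.slice, PySem.List.clampIdx]
  decide

lemma b_empty_neg (m : Int) (h2 : m < 0) : parse_sources_list_alt [] m = "" := by
  unfold parse_sources_list_alt
  rw [if_neg (by simp; omega)]
  apply String.toList_inj.mp
  simp [PySem.Str.toList_join, PySem.Chars.join, PySem.List.slice, PySem.List.clampIdx]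
  decide

-- ===== VERDICT (by name: the statement is the Claim_ definition above) =====
theorem parse_sources_list_spec : Claim_unchanged_parse_sources_list := by
  intro sources m _ hD
  unfold parse_sources_list parse_sources_list_alt
  by_cases hle : (sources.length : Int) ≤ m
  · rw [if_neg (by omega), if_pos hle]
    apply String.toList_inj.mp
    simp
  · rw [if_pos (by omega), if_neg hle]
    dsimp only
    have hgt : m < (sources.length : Int) := by omega
    have hrne : PySem.List.slice sources (some m) none ≠ [] := by
      exact rest_ne_nil sources m hgt hD
    rw [pvA_loop_eq _ _ hrne]
    obtain ⟨c, cs, hcs⟩ := List.exists_cons_of_ne_nil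
      (chunks_ne_nil (PySem.List.slice sources (some m) none) hrne)
    rw [hcs]
    simp only [List.map_cons]
    rw [str_join_cons_cons]
    apply String.toList_inj.mp
    simp

theorem parse_sources_list_changed : Claim_changed_parse_sources_list := by
  unfold Claim_changed_parse_sources_list
  refine ⟨by decide, by decide, a_empty_neg (-1) (by omega), b_empty_neg (-1) (by omega), by decide⟩

theorem parse_sources_list_tight : Claim_exact_parse_sources_list := by
  intro sources m _ hD
  obtain ⟨h1, h2⟩ := hD
  subst h1
  rw [a_empty_neg m h2, b_empty_neg m h2]
  decide
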